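-- pv_equiv track=rewrite | github.com/alexvarden/ResearchProject | Model.py | find_range_index
-- ===== SOURCE A (Python) =====
-- def find_range_index(data, numbers):
--     result = []
--     for number in numbers:
--         for key, value in data.items():
--             if number >= value[0] and number <= value[1]:
--                 result.append(key)
--                 break
--         else:
--             result.append(None)
--     return result
-- ===== SOURCE B (Python) =====
-- def find_range_index(data, numbers):
--     result = [None] * len(numbers)
--     for key, (lo, hi) in data.items():
--         for i, n in enumerate(numbers):
--             if result[i] is None and lo <= n <= hi:
--                 result[i] = key
--     return result
-- ===== Notes on version B (the rewrite author's own statement) =====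
-- stated objective: alternative
-- what changed: Loops interchanged: B preallocates a None-filled result and iterates intervals as the outer loop, writing each slot at most once (fill-once guard), instead of A's per-number inner scan with break/else.
import Mathlib
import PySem

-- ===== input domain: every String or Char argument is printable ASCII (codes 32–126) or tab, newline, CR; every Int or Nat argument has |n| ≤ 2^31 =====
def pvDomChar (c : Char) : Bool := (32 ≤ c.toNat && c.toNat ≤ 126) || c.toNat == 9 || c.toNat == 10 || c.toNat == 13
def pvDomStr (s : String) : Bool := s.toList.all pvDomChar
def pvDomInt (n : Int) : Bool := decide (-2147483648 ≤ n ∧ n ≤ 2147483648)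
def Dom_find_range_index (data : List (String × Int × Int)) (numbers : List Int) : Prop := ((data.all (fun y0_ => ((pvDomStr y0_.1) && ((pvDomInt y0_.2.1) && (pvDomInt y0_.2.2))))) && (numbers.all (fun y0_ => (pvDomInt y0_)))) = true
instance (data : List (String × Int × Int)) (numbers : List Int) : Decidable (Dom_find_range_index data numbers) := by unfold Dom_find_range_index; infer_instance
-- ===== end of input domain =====

-- B interchanges the loops: intervals outer, numbers inner, with a fill-once guard preserving the first-match key; an alternative decomposition, same cost.


-- ===== PORT A =====
def findA : List (String × Int × Int) → Int → Option String
  | [], _ => none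
  | (key, lo, hi) :: rest, number =>
    if number ≥ lo ∧ number ≤ hi then some key else findA rest number

def find_range_index (data : List (String × Int × Int)) (numbers : List Int) : List (Option String) :=
  numbers.foldl (fun result number => result ++ [findA data number]) []

-- ===== PORT B =====
def find_range_index_alt (data : List (String × Int × Int)) (numbers : List Int) : List (Option String) :=
  data.foldl
    (fun result kv =>
      List.zipWith
        (fun r n => if r = none ∧ kv.2.1 ≤ n ∧ n ≤ kv.2.2 then some kv.1 else r)
        result numbers)
    (numbers.map (fun _ => none))

-- ===== PRECONDITION & SPEC =====
def Spec_find_range_index (data : List (String × Int × Int)) (numbers : List Int) (out : List (Option String)) : Prop := out = find_range_index_alt data numbers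
instance (data : List (String × Int × Int)) (numbers : List Int) (out : List (Option String)) : Decidable (Spec_find_range_index data numbers out) := by unfold Spec_find_range_index; infer_instance

-- ===== CLAIM (what is proved, stated in full; the proofs are below) =====
def Claim_equal_find_range_index : Prop := ∀ (data : List (String × Int × Int)) (numbers : List Int), Dom_find_range_index data numbers → Spec_find_range_index data numbers (find_range_index data numbers)

-- ===== LEMMAS AND PROOFS =====
lemma zipWith_map_self (f : Option String → Int → Option String) (g : Int → Option String)
    (l : List Int) : List.zipWith f (l.map g) l = l.map (fun n => f (g n) n) := by
  induction l with
  | nil => rfl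
  | cons n rest ih => simp [ih]

lemma foldlB_map (data : List (String × Int × Int)) (numbers : List Int)
    (g : Int → Option String) :
    data.foldl
      (fun result kv =>
        List.zipWith
          (fun r n => if r = none ∧ kv.2.1 ≤ n ∧ n ≤ kv.2.2 then some kv.1 else r)
          result numbers)
      (numbers.map g)
    = numbers.map (fun n => (g n).orElse (fun _ => findA data n)) := by
  induction data generalizing g with
  | nil => simp [findA]
  | cons kv rest ih =>
    simp only [List.foldl_cons]
    rw [zipWith_map_self]
    rw [ih]
    apply List.map_congr_left
    intro n _
    obtain ⟨key, lo, hi⟩ := kv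
    cases hg : g n with
    | some k => simp [Option.orElse]
    | none =>
      by_cases h : lo ≤ n ∧ n ≤ hi <;> simp [findA, hg, h, ge_iff_le, Option.orElse]

lemma foldl_append_map (numbers : List Int) (f : Int → Option String) (acc : List (Option String)) :
    numbers.foldl (fun result number => result ++ [f number]) acc = acc ++ numbers.map f := by
  induction numbers generalizing acc with
  | nil => simp
  | cons n rest ih => simp [ih]

-- ===== VERDICT (by name: the statement is the Claim_ definition above) =====
theorem find_range_index_spec : Claim_equal_find_range_index := by
  intro data numbers _
  unfold Spec_find_range_index find_range_index find_range_index_alt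
  rw [foldl_append_map, foldlB_map]
  simp [Option.orElse]
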